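-- pv_equiv track=rewrite | github.com/Ddthomas415/CryptKeep | dashboard/services/crypto_edge_research.py | _build_origin_summary
-- ===== SOURCE A (Python) =====
-- from typing import Any
--
-- def _build_origin_summary(provenance_rows: list[dict[str, Any]]) -> tuple[str, str]:
--     if not provenance_rows:
--         return "No Snapshots", "No freshness data"
--     source_labels = sorted({str(row.get("source") or "Unknown") for row in provenance_rows})
--     freshness_labels = [str(row.get("freshness") or "Unknown") for row in provenance_rows]
--     if len(source_labels) == 1:
--         data_origin = source_labels[0]
--     else:
--         data_origin = "Mixed Sources"
--     if "Fresh" in freshness_labels: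
--         freshness = "Fresh"
--     elif "Recent" in freshness_labels:
--         freshness = "Recent"
--     elif "Aging" in freshness_labels:
--         freshness = "Aging"
--     elif "Stale" in freshness_labels:
--         freshness = "Stale"
--     else:
--         freshness = "Unknown"
--     return data_origin, freshness
-- ===== SOURCE B (Python) =====
-- def _coerce(value):
--     return str(value or "Unknown")
--
-- def _rank(label):
--     if label == "Fresh":
--         return 0
--     if label == "Recent":
--         return 1
--     if label == "Aging":
--         return 2
--     if label == "Stale":
--         return 3
--     return 4
--
-- def _rank_label(r):
--     if r == 0:
--         return "Fresh"
--     if r == 1: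
--         return "Recent"
--     if r == 2:
--         return "Aging"
--     if r == 3:
--         return "Stale"
--     return "Unknown"
--
-- def _build_origin_summary(provenance_rows):
--     if not provenance_rows:
--         return "No Snapshots", "No freshness data"
--     sources = set()
--     best = 4
--     for row in provenance_rows:
--         sources.add(_coerce(row.get("source")))
--         best = min(best, _rank(_coerce(row.get("freshness"))))
--     if len(sources) == 1:
--         (origin,) = sources
--     else:
--         origin = "Mixed Sources"
--     return origin, _rank_label(best)
-- ===== Notes on version B (the rewrite author's own statement) =====
-- stated objective: alternative
-- what changed: B replaces A's set-comprehension + sorted() + four sequential membership scans of the freshness list by a single pass over provenance_rows that accumulates the distinct source set and the minimum freshness rank (Fresh=0..Stale=3, other=4), then maps the rank back to its label; no intermediate freshness list and no sort are built.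
import Mathlib
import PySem

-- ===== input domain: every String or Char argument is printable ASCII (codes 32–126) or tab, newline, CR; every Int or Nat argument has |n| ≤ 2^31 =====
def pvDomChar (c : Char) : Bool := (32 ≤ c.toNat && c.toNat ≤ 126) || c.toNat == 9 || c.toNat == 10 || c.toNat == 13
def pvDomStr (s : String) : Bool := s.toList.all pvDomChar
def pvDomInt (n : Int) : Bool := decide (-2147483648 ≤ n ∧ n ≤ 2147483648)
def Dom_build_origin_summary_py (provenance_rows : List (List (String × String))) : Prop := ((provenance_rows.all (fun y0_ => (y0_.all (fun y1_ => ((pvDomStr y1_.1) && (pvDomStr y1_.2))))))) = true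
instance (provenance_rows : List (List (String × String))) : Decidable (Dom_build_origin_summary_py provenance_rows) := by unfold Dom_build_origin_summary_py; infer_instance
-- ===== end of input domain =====

-- B replaces A's set-comprehension + sort + four membership scans by one pass that
-- accumulates the distinct sources and the minimum freshness rank (objective: alternative).

-- shared helper: str(row.get(k) or "Unknown") — '' and a missing key both coerce to "Unknown"
def pvStrOr (v : Option String) : String :=
  match v with
  | some s => if s = "" then "Unknown" else s
  | none => "Unknown"

-- ===== PORT A =====
def build_origin_summary_py (provenance_rows : List (List (String × String))) : String × String :=
  if provenance_rows = [] then ("No Snapshots", "No freshness data")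
  else
    let source_labels := PySem.List.sorted (PySem.Set.ofList (provenance_rows.map (fun row => pvStrOr (PySem.Dict.get? (PySem.Dict.mk row) "source")))) (fun x => x) false
    let freshness_labels := provenance_rows.map (fun row => pvStrOr (PySem.Dict.get? (PySem.Dict.mk row) "freshness"))
    let data_origin := if source_labels.length = 1 then source_labels.headI else "Mixed Sources"
    let freshness :=
      if "Fresh" ∈ freshness_labels then "Fresh"
      else if "Recent" ∈ freshness_labels then "Recent"
      else if "Aging" ∈ freshness_labels then "Aging"
      else if "Stale" ∈ freshness_labels then "Stale"
      else "Unknown"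
    (data_origin, freshness)

-- ===== PORT B =====
def pvRank (label : String) : Int :=
  if label = "Fresh" then 0
  else if label = "Recent" then 1
  else if label = "Aging" then 2
  else if label = "Stale" then 3
  else 4

def pvRankLabel (r : Int) : String :=
  if r = 0 then "Fresh"
  else if r = 1 then "Recent"
  else if r = 2 then "Aging"
  else if r = 3 then "Stale"
  else "Unknown"

def build_origin_summary_py_alt (provenance_rows : List (List (String × String))) : String × String :=
  if provenance_rows = [] then ("No Snapshots", "No freshness data")
  else
    let st := provenance_rows.foldl
      (fun (st : PySem.Set String × Int) row =>
        (PySem.Set.add st.1 (pvStrOr (PySem.Dict.get? (PySem.Dict.mk row) "source")),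
         min st.2 (pvRank (pvStrOr (PySem.Dict.get? (PySem.Dict.mk row) "freshness")))))
      (PySem.Set.empty, 4)
    let origin := match st.1 with
      | [s] => s
      | _ => "Mixed Sources"
    (origin, pvRankLabel st.2)

-- ===== PRECONDITION & SPEC =====
def Spec_build_origin_summary_py (provenance_rows : List (List (String × String))) (out : String × String) : Prop := out = build_origin_summary_py_alt provenance_rows
instance (provenance_rows : List (List (String × String))) (out : String × String) : Decidable (Spec_build_origin_summary_py provenance_rows out) := by unfold Spec_build_origin_summary_py; infer_instance

-- ===== CLAIM (what is proved, stated in full; the proofs are below) =====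
def Claim_equal_build_origin_summary_py : Prop := ∀ (provenance_rows : List (List (String × String))), Dom_build_origin_summary_py provenance_rows → Spec_build_origin_summary_py provenance_rows (build_origin_summary_py provenance_rows)

-- ===== LEMMAS AND PROOFS =====

-- the paired fold splits into its two component folds
theorem pv_fold_pair (rows : List (List (String × String))) (s : PySem.Set String) (b : Int) :
    rows.foldl
      (fun (st : PySem.Set String × Int) row =>
        (PySem.Set.add st.1 (pvStrOr (PySem.Dict.get? (PySem.Dict.mk row) "source")),
         min st.2 (pvRank (pvStrOr (PySem.Dict.get? (PySem.Dict.mk row) "freshness")))))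
      (s, b)
    = (rows.foldl (fun s row => PySem.Set.add s (pvStrOr (PySem.Dict.get? (PySem.Dict.mk row) "source"))) s,
       rows.foldl (fun b row => min b (pvRank (pvStrOr (PySem.Dict.get? (PySem.Dict.mk row) "freshness")))) b) := by
  induction rows generalizing s b with
  | nil => rfl
  | cons r t ih => simpa [List.foldl] using ih _ _

theorem pv_rank_le (f : String) : pvRank f ≤ 4 := by
  unfold pvRank; split_ifs <;> omega

-- pulling the initial value out of the min-fold
theorem pv_fold_min_init (fs : List String) (b : Int) (hb : b ≤ 4) :
    fs.foldl (fun b f => min b (pvRank f)) b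
    = min b (fs.foldl (fun b f => min b (pvRank f)) 4) := by
  induction fs generalizing b with
  | nil => simpa using (by omega : min b 4 = b).symm
  | cons f t ih =>
    have h1 := pv_rank_le f
    simp only [List.foldl]
    rw [ih (min b (pvRank f)) (by omega), ih (min 4 (pvRank f)) (by omega)]
    omega

-- closed characterisation of the minimum-rank fold by the four memberships
theorem pv_fold_min_charac (fs : List String) :
    fs.foldl (fun b f => min b (pvRank f)) 4
    = (if "Fresh" ∈ fs then 0 else if "Recent" ∈ fs then 1
       else if "Aging" ∈ fs then 2 else if "Stale" ∈ fs then 3 else 4) := by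
  induction fs with
  | nil => rfl
  | cons f t ih =>
    simp only [List.foldl]
    rw [pv_fold_min_init t (min 4 (pvRank f)) (by have := pv_rank_le f; omega), ih]
    by_cases h0 : f = "Fresh" <;> by_cases h1 : f = "Recent" <;>
      by_cases h2 : f = "Aging" <;> by_cases h3 : f = "Stale" <;>
      simp only [pvRank, h0, h1, h2, h3, List.mem_cons, if_true, if_false, false_or,
        String.reduceEq] <;> split_ifs <;> simp_all

-- the same, phrased over the rows the fold actually runs on
theorem pv_fold_min_rows (rows : List (List (String × String))) :
    rows.foldl (fun b row => min b (pvRank (pvStrOr (PySem.Dict.get? (PySem.Dict.mk row) "freshness")))) 4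
    = (if "Fresh" ∈ rows.map (fun row => pvStrOr (PySem.Dict.get? (PySem.Dict.mk row) "freshness")) then 0
       else if "Recent" ∈ rows.map (fun row => pvStrOr (PySem.Dict.get? (PySem.Dict.mk row) "freshness")) then 1
       else if "Aging" ∈ rows.map (fun row => pvStrOr (PySem.Dict.get? (PySem.Dict.mk row) "freshness")) then 2
       else if "Stale" ∈ rows.map (fun row => pvStrOr (PySem.Dict.get? (PySem.Dict.mk row) "freshness")) then 3
       else 4) := by
  have h : rows.foldl (fun b row => min b (pvRank (pvStrOr (PySem.Dict.get? (PySem.Dict.mk row) "freshness")))) 4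
      = (rows.map (fun row => pvStrOr (PySem.Dict.get? (PySem.Dict.mk row) "freshness"))).foldl
          (fun b f => min b (pvRank f)) 4 := by
    simp [List.foldl_map]
  rw [h, pv_fold_min_charac]

-- the accumulated source set is set(map src rows)
theorem pv_fold_src (rows : List (List (String × String))) :
    rows.foldl (fun s row => PySem.Set.add s (pvStrOr (PySem.Dict.get? (PySem.Dict.mk row) "source"))) PySem.Set.empty
    = PySem.Set.ofList (rows.map (fun row => pvStrOr (PySem.Dict.get? (PySem.Dict.mk row) "source"))) := by
  rw [PySem.Set.ofList_eq_foldl, List.foldl_map]; rfl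

-- ===== VERDICT (by name: the statement is the Claim_ definition above) =====
theorem build_origin_summary_py_spec : Claim_equal_build_origin_summary_py := by
  intro rows _
  unfold Spec_build_origin_summary_py build_origin_summary_py build_origin_summary_py_alt
  by_cases hnil : rows = []
  · simp [hnil]
  · simp only [hnil, if_false]
    rw [pv_fold_pair, pv_fold_src, pv_fold_min_rows]
    refine Prod.ext ?_ ?_
    · -- origin component
      rcases hS : PySem.Set.ofList (rows.map (fun row => pvStrOr (PySem.Dict.get? (PySem.Dict.mk row) "source"))) with _ | ⟨x, _ | ⟨y, t⟩⟩
      · simp [PySem.List.sorted]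
      · have hs : PySem.List.sorted [x] (fun x => x) false = [x] :=
          PySem.List.sorted_eq_of_perm_of_pairwise_lt _ _ _ (List.Perm.refl _) (by simp)
        simp [hs]
      · have hl : (PySem.List.sorted (x :: y :: t) (fun x => x) false).length = t.length + 2 := by
          simp [PySem.List.length_sorted]
        simp [hl]
    · -- freshness component
      split_ifs <;> simp [pvRankLabel]
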